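-- pv_equiv track=rewrite | github.com/ODS-NN-Breakfasts/rus-ad-search-engine | search_pipeline/cloth_handler.py | _is_size_letters
-- ===== SOURCE A (Python) =====
-- MAX_CLOTHES_SIZE_X_COUNT = 12
--
-- def _is_size_letters(token):
--     res = True
--     first_digits = []
--     letters_started = False
--     end_letter_reached = False
--     x_count = 0
--     for c in token:
--         if end_letter_reached:
--             res = False
--             break
--         if c.isdigit():
--             if letters_started:
--                 res = False
--                 break
--             first_digits.append(c)
--             continue
--         if not letters_started:
--             if len(first_digits) > 0:
--                 if c.lower() != "x":
--                     res = False
--                     break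
--                 digit_val = int("".join(first_digits))
--                 if digit_val < 1 or digit_val > MAX_CLOTHES_SIZE_X_COUNT:
--                     res = False
--                     break
--             if c.lower() not in ["x", "s", "m", "l"]:
--                 res = False
--                 break
--             if c.lower() in ["s", "m", "l"]:
--                 end_letter_reached = True
--             first_digits = []
--             letters_started = True
--             continue
--         if c.lower() == "x":
--             x_count += 1
--             if len(first_digits) > 0 or x_count > MAX_CLOTHES_SIZE_X_COUNT:
--                 res = False
--                 break
--             continue
--         if c.lower() not in ["s", "m", "l"]:
--             res = False
--             break
--         end_letter_reached = True
--     if not letters_started or not end_letter_reached: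
--         res = False
--     return res
-- ===== SOURCE B (Python) =====
-- MAX_CLOTHES_SIZE_X_COUNT = 12
--
--
-- def _is_size_letters(token):
--     # Phase 1: peel off the leading digit prefix.
--     i = 0
--     while i < len(token) and token[i].isdigit():
--         i += 1
--     # Phase 2: the rest, lowercased, must be x...x followed by one of s/m/l.
--     suffix = token[i:].lower()
--     if not suffix or suffix[-1] not in ("s", "m", "l"):
--         return False
--     xs = suffix[:-1]
--     if xs != "x" * len(xs):
--         return False
--     if i > 0:
--         if not (1 <= len(xs) <= MAX_CLOTHES_SIZE_X_COUNT + 1):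
--             return False
--         return 1 <= int(token[:i]) <= MAX_CLOTHES_SIZE_X_COUNT
--     return len(xs) <= MAX_CLOTHES_SIZE_X_COUNT + 1
-- ===== Notes on version B (the rewrite author's own statement) =====
-- stated objective: simpler
-- what changed: Replaced the single-pass state machine (letters_started/end_letter_reached flags, running x_count, incremental digit buffer) by a two-phase decomposition: take the leading digit run, then validate the lowercased remainder as x-repetitions followed by one of s/m/l, with the x-count and digit-value bounds checked once on the extracted pieces.
import Mathlib
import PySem

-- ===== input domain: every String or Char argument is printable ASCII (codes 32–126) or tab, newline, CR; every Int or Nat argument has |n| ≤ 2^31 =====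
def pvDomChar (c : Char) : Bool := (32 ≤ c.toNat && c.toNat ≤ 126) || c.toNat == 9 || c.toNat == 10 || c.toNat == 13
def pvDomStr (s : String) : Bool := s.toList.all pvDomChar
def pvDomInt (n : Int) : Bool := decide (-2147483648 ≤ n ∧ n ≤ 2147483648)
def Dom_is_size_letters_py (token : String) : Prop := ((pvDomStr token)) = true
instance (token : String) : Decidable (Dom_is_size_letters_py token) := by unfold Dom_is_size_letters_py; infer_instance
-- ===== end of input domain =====

-- B replaces A's single-loop flag machine by a two-phase decomposition (digit-prefix scan, then pattern
-- check of the lowercased suffix); objective: simpler.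

-- ===== PORT A =====
def MAX_CLOTHES_SIZE_X_COUNT : Int := 12

-- the for-loop of A; state: remaining chars, first_digits, letters_started, end_letter_reached, x_count.
-- A 'break' (always with res = False) returns false; loop exhaustion returns ls && el, which is the
-- epilogue 'if not letters_started or not end_letter_reached: res = False' applied to res = True.
def pvALoop : List Char → List Char → Bool → Bool → Nat → Bool
  | [], _, ls, el, _ => ls && el
  | c :: cs, fd, ls, el, xc =>
    if el then false
    else if PySem.Chars.isdigit c then
      (if ls then false else pvALoop cs (fd ++ [c]) ls el xc)
    else if !ls then
      (if (decide (0 < fd.length) &&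
            ((PySem.Chars.lowerChar c != 'x') ||
             (match PySem.Int.ofChars? fd with
              | none => true   -- int() ValueError: unreachable, fd holds only digit chars
              | some v => decide (v < 1 ∨ MAX_CLOTHES_SIZE_X_COUNT < v))))
       then false
       else if !(['x', 's', 'm', 'l'].contains (PySem.Chars.lowerChar c)) then false
       else pvALoop cs [] true (['s', 'm', 'l'].contains (PySem.Chars.lowerChar c)) xc)
    else if PySem.Chars.lowerChar c == 'x' then
      (if decide (0 < fd.length) || decide (MAX_CLOTHES_SIZE_X_COUNT < (xc : Int) + 1) then false
       else pvALoop cs fd ls el (xc + 1))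
    else if !(['s', 'm', 'l'].contains (PySem.Chars.lowerChar c)) then false
    else pvALoop cs fd ls true xc

def is_size_letters_py (token : String) : Bool :=
  pvALoop token.toList [] false false 0

-- ===== PORT B =====
def is_size_letters_py_alt (token : String) : Bool :=
  let cs := token.toList
  -- phase 1: while i < len(token) and token[i].isdigit(): i += 1
  let digits := cs.takeWhile PySem.Chars.isdigit
  -- phase 2: suffix = token[i:].lower()
  let suffix := PySem.Chars.lower (cs.drop digits.length)
  if suffix.isEmpty || !(['s', 'm', 'l'].contains (suffix.getLastD ' ')) then false
  else
    let xs := suffix.dropLast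
    if xs ≠ List.replicate xs.length 'x' then false
    else if 0 < digits.length then
      if ¬ (1 ≤ xs.length ∧ (xs.length : Int) ≤ MAX_CLOTHES_SIZE_X_COUNT + 1) then false
      else
        match PySem.Int.ofChars? digits with
        | none => false   -- int() ValueError: unreachable, digits is a nonempty run of digit chars
        | some v => decide (1 ≤ v ∧ v ≤ MAX_CLOTHES_SIZE_X_COUNT)
    else decide ((xs.length : Int) ≤ MAX_CLOTHES_SIZE_X_COUNT + 1)

-- ===== PRECONDITION & SPEC =====
def Spec_is_size_letters_py (token : String) (out : Bool) : Prop := out = is_size_letters_py_alt token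
instance (token : String) (out : Bool) : Decidable (Spec_is_size_letters_py token out) := by unfold Spec_is_size_letters_py; infer_instance

-- ===== CLAIM (what is proved, stated in full; the proofs are below) =====
def Claim_equal_is_size_letters_py : Prop := ∀ (token : String), Dom_is_size_letters_py token → Spec_is_size_letters_py token (is_size_letters_py token)

-- ===== LEMMAS AND PROOFS =====

-- proof-side tail checker: what A's loop accepts once letters have started, with x-budget b
def pvT : List Char → Nat → Bool
  | [], _ => false
  | c :: cs, b =>
    if PySem.Chars.lowerChar c = 'x' then decide (b ≠ 0) && pvT cs (b - 1)
    else if ['s', 'm', 'l'].contains (PySem.Chars.lowerChar c) then cs.isEmpty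
    else false

-- proof-side form of B's suffix check (on an already-lowered list, with x-bound b)
def pvBcheck (l : List Char) (b : Nat) : Bool :=
  !l.isEmpty && decide (l.dropLast = List.replicate l.dropLast.length 'x')
    && (['s', 'm', 'l'].contains (l.getLastD ' ')) && decide (l.dropLast.length ≤ b)

lemma pv_digit_facts (c : Char) (h : PySem.Chars.isdigit c = true) :
    PySem.Chars.lowerChar c = c ∧ c ≠ 'x' ∧ c ≠ 's' ∧ c ≠ 'm' ∧ c ≠ 'l' := by
  simp only [PySem.Chars.isdigit, Bool.and_eq_true, decide_eq_true_eq, Char.le_def,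
    UInt32.le_iff_toNat_le] at h
  obtain ⟨h1, h2⟩ := h
  refine ⟨?_, ?_, ?_, ?_, ?_⟩
  · simp only [PySem.Chars.lowerChar, PySem.Chars.isupper]
    rw [if_neg]
    simp only [Bool.and_eq_true, decide_eq_true_eq, Char.le_def, UInt32.le_iff_toNat_le]
    rintro ⟨a, b⟩; simp at h1 h2 a b; omega
  all_goals (rintro rfl; simp_all)

lemma pv_drop_takeWhile (p : Char → Bool) (l : List Char) :
    l.drop (l.takeWhile p).length = l.dropWhile p := by
  induction l with
  | nil => rfl
  | cons c cs ih => by_cases h : p c <;> simp [h, ih]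

-- loop after end_letter_reached: accepts iff no chars remain
lemma pvALoop_el (cs : List Char) (fd : List Char) (xc : Nat) :
    pvALoop cs fd true true xc = cs.isEmpty := by
  cases cs <;> simp [pvALoop]

-- a loop entry guarded by its own flag: used for the letters-entry step
lemma pv_and_loop (q : Bool) (cs' : List Char) :
    (q && pvALoop cs' [] true q 0) = (q && cs'.isEmpty) := by
  cases q
  · simp
  · simp [pvALoop_el]

-- loop in the letters-started state equals the tail checker
lemma pvALoop_T (cs : List Char) : ∀ xc : Nat, xc ≤ 12 →
    pvALoop cs [] true false xc = pvT cs (12 - xc) := by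
  induction cs with
  | nil => intro xc h; simp [pvALoop, pvT]
  | cons c cs ih =>
    intro xc h
    by_cases hd : PySem.Chars.isdigit c = true
    · obtain ⟨hl, hx, hs, hm, hll⟩ := pv_digit_facts c hd
      simp [pvALoop, pvT, hd, hl, hx, hs, hm, hll]
    · by_cases hx : PySem.Chars.lowerChar c = 'x'
      · by_cases hxc : xc = 12
        · subst hxc
          simp [pvALoop, pvT, hd, hx, MAX_CLOTHES_SIZE_X_COUNT]
        · have h' : xc + 1 ≤ 12 := by omega
          have e : 12 - xc - 1 = 12 - (xc + 1) := by omega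
          simp [pvALoop, pvT, hd, hx, MAX_CLOTHES_SIZE_X_COUNT, ih _ h', e,
            show ¬((12 : Int) < (xc : Int) + 1) by exact_mod_cast by omega,
            show 12 - xc ≠ 0 by omega]
      · simp [pvALoop, pvT, hd, hx, pvALoop_el]

-- one step of pvBcheck past a leading 'x'
lemma pvBcheck_x (a : Char) (M : List Char) (b : Nat) (hb : b ≠ 0) :
    (decide (b ≠ 0) && pvBcheck (a :: M) (b - 1)) = pvBcheck ('x' :: a :: M) b := by
  simp [pvBcheck, hb, List.replicate_succ]
  rw [decide_eq_decide.mpr (show M.length ≤ b - 1 ↔ M.length < b by omega)]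

-- the tail checker equals B's suffix check on the lowered list
lemma pvT_Bcheck (cs : List Char) : ∀ b : Nat, pvT cs b = pvBcheck (PySem.Chars.lower cs) b := by
  induction cs with
  | nil => intro b; simp [pvT, pvBcheck, PySem.Chars.lower]
  | cons c cs ih =>
    intro b
    by_cases hx : PySem.Chars.lowerChar c = 'x'
    · cases cs with
      | nil => simp [pvT, pvBcheck, PySem.Chars.lower, hx]
      | cons d cs₂ =>
        by_cases hb : b = 0
        · subst hb
          simp [pvT, pvBcheck, PySem.Chars.lower, hx]
        · have step : pvT (c :: d :: cs₂) b = (decide (b ≠ 0) && pvT (d :: cs₂) (b - 1)) := by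
            conv_lhs => rw [pvT]
            rw [if_pos hx]
          rw [step, ih,
            show PySem.Chars.lower (c :: d :: cs₂)
                = 'x' :: PySem.Chars.lowerChar d :: PySem.Chars.lower cs₂ by
              simp [PySem.Chars.lower, hx],
            show PySem.Chars.lower (d :: cs₂)
                = PySem.Chars.lowerChar d :: PySem.Chars.lower cs₂ from rfl]
          exact pvBcheck_x _ _ b hb
    · by_cases hs : (['s', 'm', 'l'].contains (PySem.Chars.lowerChar c)) = true
      · cases cs with
        | nil => simp [pvT, pvBcheck, PySem.Chars.lower, hx, hs]
        | cons d cs₂ => simp [pvT, pvBcheck, PySem.Chars.lower, hx, hs, List.replicate_succ]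
      · cases cs with
        | nil => simp [pvT, pvBcheck, PySem.Chars.lower, hx, hs]
        | cons d cs₂ => simp [pvT, pvBcheck, PySem.Chars.lower, hx, hs, List.replicate_succ]

-- the letters-entry step of A's loop is the tail checker with budget 13
lemma pvEnter_T (c : Char) (cs' : List Char) :
    (if !(['x', 's', 'm', 'l'].contains (PySem.Chars.lowerChar c)) then false
     else pvALoop cs' [] true (['s', 'm', 'l'].contains (PySem.Chars.lowerChar c)) 0)
    = pvT (c :: cs') 13 := by
  by_cases hx : PySem.Chars.lowerChar c = 'x'
  · simp [pvT, hx, pvALoop_T cs' 0 (by omega)]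
  · simp [pvT, hx]
    exact pv_and_loop _ cs'

-- the digit-scan phase of A's loop
lemma pvALoop_scan (cs : List Char) : ∀ fd : List Char,
    pvALoop cs fd false false 0 =
      (match cs.dropWhile PySem.Chars.isdigit with
       | [] => false
       | c :: cs' =>
         if (decide (0 < (fd ++ cs.takeWhile PySem.Chars.isdigit).length) &&
              ((PySem.Chars.lowerChar c != 'x') ||
               (match PySem.Int.ofChars? (fd ++ cs.takeWhile PySem.Chars.isdigit) with
                | none => true
                | some v => decide (v < 1 ∨ MAX_CLOTHES_SIZE_X_COUNT < v))))
         then false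
         else if !(['x', 's', 'm', 'l'].contains (PySem.Chars.lowerChar c)) then false
         else pvALoop cs' [] true (['s', 'm', 'l'].contains (PySem.Chars.lowerChar c)) 0) := by
  induction cs with
  | nil => intro fd; simp [pvALoop]
  | cons c cs ih =>
    intro fd
    by_cases hd : PySem.Chars.isdigit c = true
    · simp only [pvALoop, hd, Bool.false_eq_true, ite_false, ite_true,
        List.takeWhile_cons, List.dropWhile_cons, ih (fd ++ [c]), List.append_assoc,
        List.singleton_append]
    · simp [pvALoop, hd]

-- A's post-scan decision equals B's post-scan decision
lemma pv_final (dg : List Char) (a : Char) (M : List Char) :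
    (if (decide (0 < dg.length) && ((a != 'x') ||
        (match PySem.Int.ofChars? dg with
         | none => true
         | some v => decide (v < 1 ∨ MAX_CLOTHES_SIZE_X_COUNT < v))))
     then false else pvBcheck (a :: M) 13)
    =
    (if (a :: M).isEmpty || !(['s', 'm', 'l'].contains ((a :: M).getLastD ' ')) then false
     else if (a :: M).dropLast ≠ List.replicate (a :: M).dropLast.length 'x' then false
     else if 0 < dg.length then
       if ¬ (1 ≤ (a :: M).dropLast.length ∧
             ((a :: M).dropLast.length : Int) ≤ MAX_CLOTHES_SIZE_X_COUNT + 1) then false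
       else match PySem.Int.ofChars? dg with
            | none => false
            | some v => decide (1 ≤ v ∧ v ≤ MAX_CLOTHES_SIZE_X_COUNT)
     else decide (((a :: M).dropLast.length : Int) ≤ MAX_CLOTHES_SIZE_X_COUNT + 1)) := by
  simp only [MAX_CLOTHES_SIZE_X_COUNT]
  by_cases hdg : 0 < dg.length
  · cases M with
    | nil =>
      by_cases hs : (['s', 'm', 'l'].contains a) = true
      · have hs' : a = 's' ∨ a = 'm' ∨ a = 'l' := by simpa using hs
        have hax : (a != 'x') = true := by rcases hs' with rfl | rfl | rfl <;> decide
        simp [pvBcheck, hdg, hax]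
      · simp only [List.contains_cons, List.contains_nil, Bool.or_false] at hs
        simp [pvBcheck, hdg]
        intro _ _
        simpa using hs
    | cons m M' =>
      by_cases hax : a = 'x'
      · subst hax
        cases h : PySem.Int.ofChars? dg with
        | none => simp [pvBcheck, hdg, List.replicate_succ]
        | some v =>
          have e1 : (!decide (v < 1)) = decide (1 ≤ v) := by
            rw [← decide_not]; exact decide_eq_decide.mpr not_lt
          have e2 : (!decide ((12 : Int) < v)) = decide (v ≤ 12) := by
            rw [← decide_not]; exact decide_eq_decide.mpr not_lt
          have e3 : (!decide (13 ≤ M'.length)) = decide (M'.length < 13) := by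
            rw [← decide_not]; exact decide_eq_decide.mpr not_le
          simp [hdg, List.replicate_succ, pvBcheck]
          simp only [e2, e3]
          simp [Bool.and_comm, Bool.and_left_comm, Bool.and_assoc, e1]
      · simp [hdg, hax, List.replicate_succ]
  · simp at hdg
    simp [pvBcheck, hdg]
    simp [Bool.and_comm, Bool.and_left_comm, Bool.and_assoc]

-- ===== VERDICT (by name: the statement is the Claim_ definition above) =====
theorem is_size_letters_py_spec : Claim_equal_is_size_letters_py := by
  intro token _
  unfold Spec_is_size_letters_py is_size_letters_py
  rw [pvALoop_scan token.toList []]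
  simp only [is_size_letters_py_alt, pv_drop_takeWhile, List.nil_append]
  generalize token.toList.takeWhile PySem.Chars.isdigit = dg
  generalize token.toList.dropWhile PySem.Chars.isdigit = r
  cases r with
  | nil => simp [PySem.Chars.lower]
  | cons c cs' =>
    dsimp only
    rw [pvEnter_T c cs', pvT_Bcheck (c :: cs') 13,
      show PySem.Chars.lower (c :: cs') = PySem.Chars.lowerChar c :: PySem.Chars.lower cs' from rfl]
    exact pv_final dg (PySem.Chars.lowerChar c) (PySem.Chars.lower cs')
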